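-- pv_equiv track=rewrite | github.com/taoranzhishang/Python_codes_for_learning | study_code/class_code/31Cost_calc.py | cost_calc
-- ===== SOURCE A (Python) =====
-- single_price = 28
--
-- double_price = 68
--
-- triple_price = 99
--
-- family_price = 168
--
-- def cost_calc(menu, quantity):
--     cost = 0
--     singleQuantity = 0
--     doubleQunatity = 0
--     tripleQuantity = 0
--     familyQuantity = 0
--
--     for menuTemp, quantityTemp in zip(menu, quantity):
--
--         if menuTemp == 'S' or menuTemp == 's':
--             cost += quantityTemp * single_price
--             singleQuantity += quantityTemp
--
--         if menuTemp == 'D' or menuTemp == 'd':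
--             cost += quantityTemp * double_price
--             doubleQunatity += quantityTemp
--
--         if menuTemp == 'T' or menuTemp == 't':
--             cost += quantityTemp * triple_price
--             tripleQuantity += quantityTemp
--
--         if menuTemp == 'F' or menuTemp == 'f':
--             cost += quantityTemp * family_price
--             familyQuantity += quantityTemp
--
--     else:
--         return cost, singleQuantity, doubleQunatity, tripleQuantity, familyQuantity
-- ===== SOURCE B (Python) =====
-- single_price = 28
-- double_price = 68
-- triple_price = 99
-- family_price = 168
--
-- def cost_calc(menu, quantity):
--     pairs = list(zip(menu, quantity))
--     s = sum(q for m, q in pairs if m in ('S', 's'))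
--     d = sum(q for m, q in pairs if m in ('D', 'd'))
--     t = sum(q for m, q in pairs if m in ('T', 't'))
--     f = sum(q for m, q in pairs if m in ('F', 'f'))
--     cost = single_price * s + double_price * d + triple_price * t + family_price * f
--     return cost, s, d, t, f
-- ===== Notes on version B (the rewrite author's own statement) =====
-- stated objective: simpler
-- what changed: B replaces A's single stateful loop with five accumulators by four staged filter-and-sum passes (one sum() per category over zip(menu, quantity)) followed by a closed-form cost computed from the four totals.
import Mathlib
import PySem

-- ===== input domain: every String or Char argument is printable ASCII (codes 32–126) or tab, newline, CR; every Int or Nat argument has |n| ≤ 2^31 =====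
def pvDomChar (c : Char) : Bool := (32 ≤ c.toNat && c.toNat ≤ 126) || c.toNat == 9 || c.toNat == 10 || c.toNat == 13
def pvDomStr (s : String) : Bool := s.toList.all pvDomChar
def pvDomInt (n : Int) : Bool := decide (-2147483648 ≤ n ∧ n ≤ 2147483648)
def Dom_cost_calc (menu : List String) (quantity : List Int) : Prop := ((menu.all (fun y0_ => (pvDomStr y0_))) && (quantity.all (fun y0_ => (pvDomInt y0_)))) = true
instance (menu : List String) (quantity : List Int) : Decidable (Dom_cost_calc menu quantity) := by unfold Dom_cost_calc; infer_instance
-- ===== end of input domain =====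

-- B replaces A's single stateful loop by four staged per-category filter-and-sum passes plus a closed-form cost. (objective: simpler)

-- ===== PORT A =====
def single_price : Int := 28
def double_price : Int := 68
def triple_price : Int := 99
def family_price : Int := 168

-- loop body of A: state (cost, singleQuantity, doubleQunatity, tripleQuantity, familyQuantity)
def cost_calc_step (st : Int × Int × Int × Int × Int) (mq : String × Int) : Int × Int × Int × Int × Int :=
  let c := st.1; let s := st.2.1; let d := st.2.2.1; let t := st.2.2.2.1; let f := st.2.2.2.2
  let m := mq.1; let q := mq.2
  let cs : Int × Int := if m == "S" || m == "s" then (c + q * single_price, s + q) else (c, s)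
  let cd : Int × Int := if m == "D" || m == "d" then (cs.1 + q * double_price, d + q) else (cs.1, d)
  let ct : Int × Int := if m == "T" || m == "t" then (cd.1 + q * triple_price, t + q) else (cd.1, t)
  let cf : Int × Int := if m == "F" || m == "f" then (ct.1 + q * family_price, f + q) else (ct.1, f)
  (cf.1, cs.2, cd.2, ct.2, cf.2)

def cost_calc (menu : List String) (quantity : List Int) : Int × Int × Int × Int × Int :=
  (menu.zip quantity).foldl cost_calc_step (0, 0, 0, 0, 0)

-- ===== PORT B =====
-- sum(q for m, q in pairs if m in (a, b))
def catSum (pairs : List (String × Int)) (a b : String) : Int :=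
  ((pairs.filter (fun p => p.1 == a || p.1 == b)).map Prod.snd).sum

def cost_calc_alt (menu : List String) (quantity : List Int) : Int × Int × Int × Int × Int :=
  let pairs := menu.zip quantity
  let s := catSum pairs "S" "s"
  let d := catSum pairs "D" "d"
  let t := catSum pairs "T" "t"
  let f := catSum pairs "F" "f"
  (single_price * s + double_price * d + triple_price * t + family_price * f, s, d, t, f)

-- ===== PRECONDITION & SPEC =====
def Spec_cost_calc (menu : List String) (quantity : List Int) (out : Int × Int × Int × Int × Int) : Prop := out = cost_calc_alt menu quantity
instance (menu : List String) (quantity : List Int) (out : Int × Int × Int × Int × Int) : Decidable (Spec_cost_calc menu quantity out) := by unfold Spec_cost_calc; infer_instance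

-- ===== CLAIM (what is proved, stated in full; the proofs are below) =====
def Claim_equal_cost_calc : Prop := ∀ (menu : List String) (quantity : List Int), Dom_cost_calc menu quantity → Spec_cost_calc menu quantity (cost_calc menu quantity)

-- ===== LEMMAS AND PROOFS =====

theorem catSum_cons (p : String × Int) (L : List (String × Int)) (a b : String) :
    catSum (p :: L) a b = (if p.1 == a || p.1 == b then p.2 else 0) + catSum L a b := by
  unfold catSum
  by_cases h : (p.1 == a || p.1 == b) = true
  · simp [h]
  · simp [h]

-- Loop invariant: A's fold from any state is the state shifted by the per-category filter sums.
theorem cost_calc_loop (L : List (String × Int)) :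
    ∀ (c s d t f : Int),
      L.foldl cost_calc_step (c, s, d, t, f) =
        (c + single_price * catSum L "S" "s" + double_price * catSum L "D" "d"
           + triple_price * catSum L "T" "t" + family_price * catSum L "F" "f",
         s + catSum L "S" "s", d + catSum L "D" "d", t + catSum L "T" "t", f + catSum L "F" "f") := by
  induction L with
  | nil =>
      intro c s d t f
      simp [catSum]
  | cons p L ih =>
      intro c s d t f
      obtain ⟨m, q⟩ := p
      simp only [List.foldl_cons, ih, catSum_cons, cost_calc_step, single_price, double_price,
        triple_price, family_price]
      by_cases hS : (m == "S" || m == "s") = true <;>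
        by_cases hD : (m == "D" || m == "d") = true <;>
          by_cases hT : (m == "T" || m == "t") = true <;>
            by_cases hF : (m == "F" || m == "f") = true <;>
              simp only [hS, hD, hT, hF, if_true, if_neg,
                Bool.false_eq_true, not_false_eq_true] <;>
              exact Prod.ext (by ring) (Prod.ext (by ring) (Prod.ext (by ring)
                (Prod.ext (by ring) (by ring))))

theorem cost_calc_spec : Claim_equal_cost_calc := by
  intro menu quantity _
  unfold Spec_cost_calc cost_calc cost_calc_alt
  rw [cost_calc_loop]
  dsimp only
  simp only [Prod.mk.injEq]
  refine ⟨by ring, by ring, by ring, by ring, by ring⟩
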